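-- pv_equiv track=rewrite | github.com/csw180/romanticpy | pgmers/bintrans.py | solution
-- ===== SOURCE A (Python) =====
-- def  trans(s) :
--   cnt = s.count('0')
--   s = s.replace('0','')
--   return cnt,bin(len(s))[2:]
--
-- def solution(s) :
--
--   zcnt =0
--   loop = 0
--
--   while s != '1' :
--     c, s= trans(s)
--     zcnt +=c
--     loop+=1
--
--   return [loop,zcnt]
-- ===== SOURCE B (Python) =====
-- def solution(s):
--     if s == '1':
--         return [0, 0]
--     zcnt = s.count('0')
--     m = len(s) - zcnt
--     loop = 1
--     while m != 1:
--         zcnt += m.bit_length() - m.bit_count()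
--         loop += 1
--         m = m.bit_count()
--     return [loop, zcnt]
-- ===== Notes on version B (the rewrite author's own statement) =====
-- stated objective: alternative
-- what changed: B tracks the integer m (count of non-'0' characters, then popcount) with bit_length/bit_count instead of rebuilding and rescanning a binary string with count/replace/bin on every iteration; the all-'0' strings on which A loops forever are excluded by Pre_ (B's loop diverges there too).
import Mathlib
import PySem

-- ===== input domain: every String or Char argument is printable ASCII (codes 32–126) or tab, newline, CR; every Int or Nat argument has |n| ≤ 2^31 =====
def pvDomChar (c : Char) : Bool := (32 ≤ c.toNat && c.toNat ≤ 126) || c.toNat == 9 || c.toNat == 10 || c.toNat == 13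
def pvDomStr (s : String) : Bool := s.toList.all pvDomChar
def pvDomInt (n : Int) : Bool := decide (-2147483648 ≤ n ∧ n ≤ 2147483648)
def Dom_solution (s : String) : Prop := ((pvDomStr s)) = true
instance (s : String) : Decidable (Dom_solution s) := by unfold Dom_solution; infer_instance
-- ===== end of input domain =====

-- B keeps the integer m (non-'0' character count / popcount) instead of rebuilding binary strings; alternative formulation, same asymptotics.
-- Pre_solution excludes strings consisting only of '0' (including ""), on which A's while loop never terminates (B's loop diverges there too).


-- ===== PORT A =====
-- trans(s): cnt = s.count('0'); s = s.replace('0',''); return cnt, bin(len(s))[2:]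
def pvTrans (s : String) : Int × String :=
  let cnt : Int := (PySem.Str.count s "0" : Int)
  let s2 := PySem.Str.replace s "0" ""
  (cnt, PySem.Str.slice (PySem.Int.pyBin (PySem.Str.len s2)) (some 2) none)

-- the while loop; the fuel is only a totality guard: under Pre_solution the loop
-- runs at most len(s)+2 iterations (proved below), so the 0-fuel case is never reached
def solutionLoop : Nat → String → Int → Int → List Int
  | 0, _, loop, zcnt => [loop, zcnt]
  | fuel+1, s, loop, zcnt =>
    if s = "1" then [loop, zcnt]
    else
      let p := pvTrans s
      solutionLoop fuel p.2 (loop + 1) (zcnt + p.1)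

def solution (s : String) : List Int := solutionLoop (s.toList.length + 2) s 0 0

-- ===== PORT B =====
-- the while loop over the integer m; fuel is a totality guard as in port A
def solutionAltLoop : Nat → Int → Int → Int → List Int
  | 0, _, loop, zcnt => [loop, zcnt]
  | fuel+1, m, loop, zcnt =>
    if m = 1 then [loop, zcnt]
    else solutionAltLoop fuel (PySem.Int.bitCount m : Int) (loop + 1)
           (zcnt + ((PySem.Int.bitLength m : Int) - (PySem.Int.bitCount m : Int)))

def solution_alt (s : String) : List Int :=
  if s = "1" then [0, 0]
  else
    let zcnt : Int := (PySem.Str.count s "0" : Int)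
    let m : Int := PySem.Str.len s - zcnt
    solutionAltLoop (m.toNat + 1) m 1 zcnt

-- ===== PRECONDITION & SPEC =====
-- Pre_ excludes exactly the strings with no character other than '0' (so "" and "0…0"):
-- on those A's while loop (and B's) never terminates, so A returns on no such input.
def Pre_solution (s : String) : Prop := s.toList.any (fun c => !(c == '0')) = true
instance (s : String) : Decidable (Pre_solution s) := by unfold Pre_solution; infer_instance
def pvWitness_solution : String := "110"

def Spec_solution (s : String) (out : List Int) : Prop := out = solution_alt s
instance (s : String) (out : List Int) : Decidable (Spec_solution s out) := by unfold Spec_solution; infer_instance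

-- ===== CLAIM (what is proved, stated in full; the proofs are below) =====
def Claim_equal_solution : Prop := ∀ (s : String), Dom_solution s → Pre_solution s → Spec_solution s (solution s)

-- ===== LEMMAS AND PROOFS =====

def pvBits (n : Nat) : List Char :=
  if h : n < 2 then [Nat.digitChar n] else pvBits (n / 2) ++ [Nat.digitChar (n % 2)]
decreasing_by exact Nat.div_lt_self (by omega) (by omega)

lemma pvToDigitsCore_eq (n : Nat) : ∀ (fuel : Nat) (ds : List Char), n < fuel →
    Nat.toDigitsCore 2 fuel n ds = pvBits n ++ ds := by
  induction n using Nat.strong_induction_on with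
  | _ n ih =>
    intro fuel ds hf
    match fuel with
    | f+1 =>
      rw [Nat.toDigitsCore]
      by_cases h2 : n < 2
      · have : n / 2 = 0 := by omega
        rw [pvBits]
        simp [this, h2]
        congr 1
        omega
      · have hne : ¬ n / 2 = 0 := by omega
        simp only [hne, if_false]
        rw [ih (n/2) (by omega) f _ (by omega)]
        conv_rhs => rw [pvBits]
        simp [h2]

lemma pvToDigits_eq (n : Nat) : Nat.toDigits 2 n = pvBits n := by
  rw [Nat.toDigits, pvToDigitsCore_eq n (n+1) [] (by omega)]; simp

lemma pvSlice_pyBin (k : Nat) :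
    PySem.Str.slice (PySem.Int.pyBin (k : Int)) (some 2) none = String.ofList (pvBits k) := by
  apply String.toList_inj.mp
  rw [PySem.Str.toList_slice, PySem.Int.toList_pyBin]
  rw [show PySem.Int.toBinChars0b (k : Int) = '0' :: 'b' :: Nat.toDigits 2 k by
    simp [PySem.Int.toBinChars0b]]
  simp [pysem, pvToDigits_eq]

lemma pvCountGo (c : Char) :
    ∀ (l : List Char) (fuel acc : Nat), l.length ≤ fuel →
    PySem.Chars.count.go [c] fuel l acc = acc + l.count c := by
  intro l
  induction l with
  | nil => intro fuel acc h; match fuel with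
    | 0 => simp [PySem.Chars.count.go]
    | f+1 => simp [PySem.Chars.count.go]
  | cons a t ih =>
    intro fuel acc h
    match fuel with
    | f+1 =>
      rw [PySem.Chars.count.go]
      by_cases hc : a = c
      · simp [hc, List.isPrefixOf, List.count_cons, ih f (acc+1) (by simpa using Nat.le_of_succ_le_succ h)]
        omega
      · simp [List.isPrefixOf, Ne.symm hc, hc, List.count_cons, ih f acc (by simpa using Nat.le_of_succ_le_succ h)]

lemma pvCount_char (s : String) : PySem.Str.count s "0" = s.toList.count '0' := by
  rw [PySem.Str.count_eq]
  have : ("0" : String).toList = ['0'] := by decide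
  rw [this, PySem.Chars.count]
  simpa using pvCountGo '0' s.toList s.toList.length 0 (le_refl _)

lemma pvReplaceGo (c : Char) :
    ∀ (l acc : List Char) (fuel : Nat), l.length ≤ fuel →
    PySem.Chars.replace.go [c] [] fuel l acc = acc.reverse ++ l.filter (fun x => !(x == c)) := by
  intro l
  induction l with
  | nil => intro acc fuel h; match fuel with
    | 0 => simp [PySem.Chars.replace.go]
    | f+1 => simp [PySem.Chars.replace.go]
  | cons a t ih =>
    intro acc fuel h
    match fuel with
    | f+1 =>
      rw [PySem.Chars.replace.go]
      by_cases hc : a = c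
      · simp [hc, List.isPrefixOf, ih acc f (by simpa using Nat.le_of_succ_le_succ h)]
      · simp [List.isPrefixOf, Ne.symm hc, hc, ih (a :: acc) f (by simpa using Nat.le_of_succ_le_succ h)]

lemma pvBitCount_pos (m : Nat) (h : 1 ≤ m) : 1 ≤ PySem.Int.bitCount (m : Int) := by
  induction m using Nat.strong_induction_on with
  | _ m ih =>
    rw [PySem.Int.bitCount_natCast (by omega)]
    by_cases h2 : m < 2
    · interval_cases m <;> simp
    · have := ih (m/2) (by omega) (by omega)
      omega

lemma pvBitCount_lt (m : Nat) (h : 2 ≤ m) : PySem.Int.bitCount (m : Int) < m := by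
  induction m using Nat.strong_induction_on with
  | _ m ih =>
    rw [PySem.Int.bitCount_natCast (by omega)]
    by_cases h2 : m / 2 < 2
    · have : PySem.Int.bitCount ((m/2 : Nat) : Int) ≤ 1 := by
        interval_cases h : (m/2) <;> simp [h] <;> decide
      omega
    · have := ih (m/2) (by omega) (by omega)
      omega

lemma pvBits_len (m : Nat) (h : 1 ≤ m) : (pvBits m).length = PySem.Int.bitLength (m : Int) := by
  induction m using Nat.strong_induction_on with
  | _ m ih =>
    rw [PySem.Int.bitLength_natCast (by omega), pvBits]
    by_cases h2 : m < 2
    · interval_cases m <;> simp <;> decide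
    · have := ih (m/2) (by omega) (by omega)
      simp [h2, this]

lemma pvBitLength_pos (m : Nat) (h : 1 ≤ m) : 1 ≤ PySem.Int.bitLength (m : Int) := by
  rw [PySem.Int.bitLength_natCast (by omega)]; omega

lemma pvBits_count0 (m : Nat) (h : 1 ≤ m) :
    (pvBits m).count '0' = PySem.Int.bitLength (m : Int) - PySem.Int.bitCount (m : Int) := by
  induction m using Nat.strong_induction_on with
  | _ m ih =>
    rw [PySem.Int.bitLength_natCast (by omega), PySem.Int.bitCount_natCast (by omega), pvBits]
    by_cases h2 : m < 2
    · interval_cases m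
      simp
      decide
    · have := ih (m/2) (by omega) (by omega)
      have hle := PySem.Int.bitCount_le_bitLength ((m/2 : Nat) : Int)
      have hcnt : List.count '0' [Nat.digitChar (m % 2)] = 1 - m % 2 := by
        rcases Nat.mod_two_eq_zero_or_one m with h3 | h3 <;> rw [h3] <;> decide
      rw [dif_neg h2, List.count_append, this, hcnt]
      have hm2 : m % 2 < 2 := Nat.mod_lt _ (by omega)
      omega

lemma pvBits_filter (m : Nat) (h : 1 ≤ m) :
    ((pvBits m).filter (fun x => !(x == '0'))).length = PySem.Int.bitCount (m : Int) := by
  induction m using Nat.strong_induction_on with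
  | _ m ih =>
    rw [PySem.Int.bitCount_natCast (by omega), pvBits]
    by_cases h2 : m < 2
    · interval_cases m
      simp
      decide
    · have := ih (m/2) (by omega) (by omega)
      have hcnt : ((List.filter (fun x => !(x == '0')) [Nat.digitChar (m % 2)])).length = m % 2 := by
        rcases Nat.mod_two_eq_zero_or_one m with h3 | h3 <;> rw [h3] <;> decide
      rw [dif_neg h2, List.filter_append, List.length_append, this, hcnt]
      omega

lemma pvBits_eq_one (m : Nat) (h : 1 ≤ m) : pvBits m = ['1'] ↔ m = 1 := by
  constructor
  · intro he
    by_contra hne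
    have h2 : 2 ≤ m := by omega
    have hlen := pvBits_len m h
    rw [he] at hlen
    simp at hlen
    rw [PySem.Int.bitLength_natCast (by omega)] at hlen
    have := pvBitLength_pos (m/2) (by omega)
    omega
  · intro he
    subst he
    rw [pvBits]
    decide

lemma pvOfList_ne_one (m : Nat) (h : 2 ≤ m) : String.ofList (pvBits m) ≠ "1" := by
  intro he
  have : pvBits m = ['1'] := by
    have := congrArg String.toList he
    simpa using this
  rw [pvBits_eq_one m (by omega)] at this
  omega

lemma pvTrans_bits (m : Nat) (h : 1 ≤ m) :
    pvTrans (String.ofList (pvBits m)) =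
      (((PySem.Int.bitLength (m : Int) - PySem.Int.bitCount (m : Int) : Nat) : Int),
        String.ofList (pvBits (PySem.Int.bitCount (m : Int)))) := by
  have hc : (PySem.Str.count (String.ofList (pvBits m)) "0" : Int)
      = ((PySem.Int.bitLength (m : Int) - PySem.Int.bitCount (m : Int) : Nat) : Int) := by
    rw [pvCount_char]
    simp [pvBits_count0 m h]
  have hrep : PySem.Chars.replace (pvBits m) ['0'] [] = (pvBits m).filter (fun x => !(x == '0')) := by
    rw [PySem.Chars.replace]
    simpa using pvReplaceGo '0' (pvBits m) [] (pvBits m).length (le_refl _)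
  unfold pvTrans
  simp only
  have hlen : PySem.Str.len (PySem.Str.replace (String.ofList (pvBits m)) "0" "") =
      ((PySem.Int.bitCount (m : Int) : Nat) : Int) := by
    rw [PySem.Str.len_eq, PySem.Str.toList_replace]
    simp only [String.toList_ofList]
    rw [show ("0" : String).toList = ['0'] from by decide, show ("" : String).toList = [] from by decide]
    rw [hrep, pvBits_filter m h]
  simp only [hc, hlen, pvSlice_pyBin]

lemma pvLoopEq (m : Nat) (hm : 1 ≤ m) : ∀ (f g : Nat), m ≤ f → m ≤ g → ∀ (l z : Int),
    solutionLoop f (String.ofList (pvBits m)) l z = solutionAltLoop g (m : Int) l z := by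
  induction m using Nat.strong_induction_on with
  | _ m ih =>
    intro f g hf hg l z
    obtain ⟨f', rfl⟩ : ∃ f', f = f' + 1 := ⟨f - 1, by omega⟩
    obtain ⟨g', rfl⟩ : ∃ g', g = g' + 1 := ⟨g - 1, by omega⟩
    · by_cases h2 : m = 1
      · subst h2
        have : String.ofList (pvBits 1) = "1" := by rw [pvBits]; decide
        simp [solutionLoop, solutionAltLoop, this]
      · have hne := pvOfList_ne_one m (by omega)
        have hmi : ((m : Int)) ≠ 1 := by omega
        rw [solutionLoop, solutionAltLoop, if_neg hne, if_neg hmi]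
        rw [pvTrans_bits m hm]
        have hcast : ((PySem.Int.bitLength (m : Int) - PySem.Int.bitCount (m : Int) : Nat) : Int)
            = (PySem.Int.bitLength (m : Int) : Int) - (PySem.Int.bitCount (m : Int) : Int) := by
          have := PySem.Int.bitCount_le_bitLength ((m : Nat) : Int)
          omega
        have hlt := pvBitCount_lt m (by omega)
        have hpos := pvBitCount_pos m hm
        simpa [hcast] using ih (PySem.Int.bitCount (m : Int)) (by omega) (by omega)
          f' g' (by omega) (by omega) (l+1) (z + ((PySem.Int.bitLength (m : Int) : Int) - (PySem.Int.bitCount (m : Int) : Int)))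

lemma pvCountP_not (l : List Char) (p : Char → Bool) :
    l.countP p + l.countP (fun c => !p c) = l.length := by
  induction l with
  | nil => rfl
  | cons a t ih => by_cases h : p a <;> simp [h] <;> omega

lemma pvFilterLen (l : List Char) :
    (l.filter (fun x => !(x == '0'))).length = l.length - l.count '0' := by
  have := pvCountP_not l (fun c => c == '0')
  simp only [List.count_eq_countP, ← List.countP_eq_length_filter]
  omega

lemma pvTrans_any (s : String) :
    pvTrans s = ((s.toList.count '0' : Int),
      String.ofList (pvBits (s.toList.length - s.toList.count '0'))) := by
  have hrep : PySem.Chars.replace s.toList ['0'] [] = s.toList.filter (fun x => !(x == '0')) := by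
    rw [PySem.Chars.replace]
    simpa using pvReplaceGo '0' s.toList [] s.toList.length (le_refl _)
  have hlen : PySem.Str.len (PySem.Str.replace s "0" "") =
      ((s.toList.length - s.toList.count '0' : Nat) : Int) := by
    rw [PySem.Str.len_eq, PySem.Str.toList_replace]
    rw [show ("0" : String).toList = ['0'] from by decide, show ("" : String).toList = [] from by decide]
    rw [hrep, pvFilterLen]
  unfold pvTrans
  simp only
  rw [pvCount_char, hlen, pvSlice_pyBin]

theorem pvMain (s : String) (pre : Pre_solution s) : solution s = solution_alt s := by
  by_cases hs1 : s = "1"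
  · subst hs1
    rw [solution, solution_alt, if_pos rfl]
    rw [show ("1" : String).toList.length + 2 = 3 from by decide]
    rw [solutionLoop, if_pos rfl]
  · have pre' : ∃ c ∈ s.toList, c ≠ '0' := by simpa [Pre_solution] using pre
    have hklt : s.toList.count '0' < s.toList.length := List.count_lt_length_iff.mpr pre'
    have hk1 : 1 ≤ s.toList.length - s.toList.count '0' := by omega
    rw [solution, show s.toList.length + 2 = (s.toList.length + 1) + 1 from rfl,
      solutionLoop, if_neg hs1, pvTrans_any]
    rw [solution_alt, if_neg hs1]
    simp only
    have hm : PySem.Str.len s - ((PySem.Str.count s "0" : Nat) : Int)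
        = (((s.toList.length - s.toList.count '0' : Nat)) : Int) := by
      rw [PySem.Str.len_eq, pvCount_char]
      omega
    rw [hm]
    simp only [Int.toNat_natCast]
    have := pvLoopEq (s.toList.length - s.toList.count '0') hk1
      (s.toList.length + 1) ((s.toList.length - s.toList.count '0') + 1)
      (by omega) (by omega) 1 (s.toList.count '0' : Int)
    have hcc : PySem.Chars.count s.toList ['0'] = s.toList.count '0' := by
      simpa [PySem.Str.count_eq] using pvCount_char s
    simpa [hcc] using this

-- ===== VERDICT (by name: the statement is the Claim_ definition above) =====
theorem solution_spec : Claim_equal_solution := by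
  intro s _ pre
  unfold Spec_solution
  exact pvMain s pre
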